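-- pv_equiv track=rewrite | github.com/nveerman1/team-evaluatie-app | backend/app/api/v1/routers/allocations.py | _round_robin_k_peers
-- ===== SOURCE A (Python) =====
-- from typing import List, Dict, Optional, Tuple
--
-- def _round_robin_k_peers(user_ids: List[int], k: int) -> List[Tuple[int, int]]:
--     """
--     Voor elk user_id kiest dit k peers (geen self), rondlopend.
--     """
--     n = len(user_ids)
--     pairs: List[Tuple[int, int]] = []
--     if n < 2 or k <= 0:
--         return pairs
--
--     for i, reviewer in enumerate(user_ids):
--         picks: List[int] = []
--         step = 1
--         while len(picks) < min(k, n - 1):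
--             ridx = (i + step) % n
--             reviewee = user_ids[ridx]
--             if reviewee != reviewer:
--                 picks.append(reviewee)
--             step += 1
--         for reviewee in picks:
--             pairs.append((reviewer, reviewee))
--     return pairs
-- ===== SOURCE B (Python) =====
-- from typing import List, Tuple
--
-- def _round_robin_k_peers(user_ids: List[int], k: int) -> List[Tuple[int, int]]:
--     n = len(user_ids)
--     if n < 2 or k <= 0:
--         return []
--     m = min(k, n - 1)
--     pairs: List[Tuple[int, int]] = []
--     for i, reviewer in enumerate(user_ids):
--         valids = [user_ids[(i + t) % n] for t in range(1, n)
--                   if user_ids[(i + t) % n] != reviewer]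
--         pairs.extend((reviewer, valids[j % len(valids)]) for j in range(m))
--     return pairs
-- ===== Notes on version B (the rewrite author's own statement) =====
-- stated objective: alternative
-- what changed: B precomputes, per reviewer, the filtered round-robin peer list once and emits the k picks by modular indexing into it, instead of A's skip-while stepping loop; Pre_ excludes constant lists of length >= 2 with k >= 1, on which A loops forever (B raises ZeroDivisionError there).
import Mathlib
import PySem

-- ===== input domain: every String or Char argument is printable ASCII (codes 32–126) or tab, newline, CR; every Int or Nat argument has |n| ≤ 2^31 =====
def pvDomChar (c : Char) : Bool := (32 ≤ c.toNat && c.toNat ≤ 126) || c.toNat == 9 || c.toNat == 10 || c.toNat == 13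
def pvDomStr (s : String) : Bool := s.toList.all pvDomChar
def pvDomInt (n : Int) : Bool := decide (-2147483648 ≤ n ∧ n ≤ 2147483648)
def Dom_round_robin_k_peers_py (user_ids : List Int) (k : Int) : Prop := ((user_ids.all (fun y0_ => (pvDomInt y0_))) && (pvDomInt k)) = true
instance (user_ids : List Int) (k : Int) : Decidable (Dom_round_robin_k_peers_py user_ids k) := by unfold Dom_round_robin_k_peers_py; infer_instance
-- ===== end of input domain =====

-- B replaces A's skip-while stepping loop by a per-reviewer precomputed filtered peer cycle indexed modularly (objective: alternative decomposition; return value only, no mutation).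

-- ===== PORT A =====
-- A's 'while len(picks) < min(k, n-1)' loop, with fuel n*m (enough whenever the
-- Python loop terminates, i.e. whenever user_ids is not constant — see Pre_).
def aPickLoop (user_ids : List Int) (n : Nat) (reviewer : Int) (i : Int) (m : Nat)
    (picks : List Int) (step : Nat) : Nat → List Int
  | 0 => picks
  | fuel+1 =>
    if picks.length < m then
      let ridx := PySem.Int.mod (i + step) n          -- (i + step) % n
      let reviewee := PySem.List.pyGetD user_ids ridx 0  -- user_ids[ridx]; ridx is always in range
      aPickLoop user_ids n reviewer i m
        (if reviewee ≠ reviewer then picks ++ [reviewee] else picks) (step+1) fuel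
    else picks

def round_robin_k_peers_py (user_ids : List Int) (k : Int) : List (Int × Int) :=
  let n := user_ids.length
  let pairs : List (Int × Int) := []
  if n < 2 ∨ k ≤ 0 then pairs
  else
    -- min(k, n-1): in this branch k ≥ 1 and n ≥ 2, so toNat is faithful
    let m := (min k ((n : Int) - 1)).toNat
    (PySem.List.enumerate user_ids 0).foldl (fun pairs p =>
      let picks := aPickLoop user_ids n p.2 p.1 m [] 1 (n * m)
      picks.foldl (fun pairs reviewee => pairs ++ [(p.2, reviewee)]) pairs) pairs

-- ===== PORT B =====
def round_robin_k_peers_py_alt (user_ids : List Int) (k : Int) : List (Int × Int) :=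
  let n := user_ids.length
  if n < 2 ∨ k ≤ 0 then []
  else
    let m := (min k ((n : Int) - 1)).toNat
    (PySem.List.enumerate user_ids 0).flatMap (fun p =>
      let valids := (PySem.List.pyRange 1 (n : Int) 1).filterMap (fun t =>
        let v := PySem.List.pyGetD user_ids (PySem.Int.mod (p.1 + t) n) 0
        if v ≠ p.2 then some v else none)
      -- valids[j % len(valids)]; nonempty under Pre_ (Python B raises ZeroDivisionError otherwise)
      (List.range m).map (fun j => (p.2, valids.getD (j % valids.length) 0)))

-- ===== PRECONDITION & SPEC =====
-- Pre_ excludes exactly the constant lists of length ≥ 2 with k ≥ 1: there A's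
-- while loop never terminates (it never finds a peer ≠ reviewer), so A returns
-- on no such input; B raises ZeroDivisionError there.
def Pre_round_robin_k_peers_py (user_ids : List Int) (k : Int) : Prop :=
  user_ids.length < 2 ∨ k ≤ 0 ∨ ¬ (∀ x ∈ user_ids, x = user_ids.getD 0 0)
instance (user_ids : List Int) (k : Int) : Decidable (Pre_round_robin_k_peers_py user_ids k) := by unfold Pre_round_robin_k_peers_py; infer_instance

def pvWitness_round_robin_k_peers_py : List Int × Int := ([1, 2, 3], 2)

def Spec_round_robin_k_peers_py (user_ids : List Int) (k : Int) (out : List (Int × Int)) : Prop := out = round_robin_k_peers_py_alt user_ids k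
instance (user_ids : List Int) (k : Int) (out : List (Int × Int)) : Decidable (Spec_round_robin_k_peers_py user_ids k out) := by unfold Spec_round_robin_k_peers_py; infer_instance

-- ===== CLAIM (what is proved, stated in full; the proofs are below) =====
def Claim_equal_round_robin_k_peers_py : Prop := ∀ (user_ids : List Int) (k : Int), Dom_round_robin_k_peers_py user_ids k → Pre_round_robin_k_peers_py user_ids k → Spec_round_robin_k_peers_py user_ids k (round_robin_k_peers_py user_ids k)

-- ===== LEMMAS AND PROOFS =====

-- One round-robin probe: the value A would pick at offset t from reviewer index i, or none.
def pvF (user_ids : List Int) (n : Nat) (reviewer : Int) (i t : Nat) : Option Int :=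
  let v := user_ids.getD ((i + t) % n) 0
  if v ≠ reviewer then some v else none

-- The stream of picked values for offsets step, step+1, …, step+fuel-1.
def pvSeq (user_ids : List Int) (n : Nat) (reviewer : Int) (i : Nat) (step : Nat) : Nat → List Int
  | 0 => []
  | fuel+1 => (pvF user_ids n reviewer i step).toList ++ pvSeq user_ids n reviewer i (step+1) fuel

theorem pvSeq_append (u : List Int) (n : Nat) (r : Int) (i : Nat) (a b step : Nat) :
    pvSeq u n r i step (a + b) = pvSeq u n r i step a ++ pvSeq u n r i (step + a) b := by
  induction a generalizing step with
  | zero => simp [pvSeq]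
  | succ a ih =>
    rw [show a + 1 + b = (a + b) + 1 by omega, pvSeq, pvSeq, ih, List.append_assoc,
      show step + 1 + a = step + (a + 1) by omega]

theorem pvF_shift (u : List Int) (n : Nat) (r : Int) (i step : Nat) :
    pvF u n r i (step + n) = pvF u n r i step := by
  unfold pvF
  rw [show i + (step + n) = (i + step) + n by omega, Nat.add_mod_right]

theorem pvSeq_shift (u : List Int) (n : Nat) (r : Int) (i : Nat) (fuel : Nat) :
    ∀ step, pvSeq u n r i (step + n) fuel = pvSeq u n r i step fuel := by
  induction fuel with
  | zero => intro step; rfl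
  | succ f ih =>
    intro step
    rw [pvSeq, pvSeq, pvF_shift, show step + n + 1 = (step + 1) + n by omega, ih]

-- Loop characterisation: A's pick loop takes from the pvSeq stream.
theorem aPickLoop_eq (u : List Int) (n : Nat) (r : Int) (i : Nat) (m : Nat) :
    ∀ (fuel : Nat) (picks : List Int) (step : Nat),
      m ≤ picks.length + (pvSeq u n r i step fuel).length →
      aPickLoop u n r (i : Int) m picks step fuel
        = picks ++ (pvSeq u n r i step fuel).take (m - picks.length) := by
  intro fuel
  induction fuel with
  | zero => intro picks step h; simp [aPickLoop, pvSeq]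
  | succ f ih =>
    intro picks step h
    rw [aPickLoop]
    by_cases hlt : picks.length < m
    · rw [if_pos hlt]
      have hv : PySem.List.pyGetD u (PySem.Int.mod ((i : Int) + (step : Nat)) (n : Nat)) 0
          = u.getD ((i + step) % n) 0 := by
        rw [show ((i : Int) + (step : Nat)) = (((i + step : Nat) : Int)) by push_cast; ring,
          PySem.Int.mod_natCast, PySem.List.pyGetD_natCast]
      rw [pvSeq] at h ⊢
      simp only [hv]
      unfold pvF at h ⊢
      by_cases hc : u.getD ((i + step) % n) 0 ≠ r
      · rw [if_pos hc] at h ⊢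
        rw [if_pos hc]
        rw [ih (picks ++ [u.getD ((i + step) % n) 0]) (step + 1) (by simp at h ⊢; omega)]
        simp only [Option.toList_some, List.append_assoc,
          List.cons_append, List.nil_append]
        rw [show m - picks.length = (m - (picks ++ [u.getD ((i + step) % n) 0]).length) + 1 by
          simp; omega]
        simp [List.take_succ_cons]
      · rw [if_neg hc] at h ⊢
        rw [if_neg hc]
        rw [ih picks (step + 1) (by simpa using h)]
        simp
    · rw [if_neg hlt]
      have : m - picks.length = 0 := by omega
      rw [this]
      simp

theorem pvSeq_cycle (u : List Int) (n : Nat) (r : Int) (i : Nat) (c : Nat) :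
    pvSeq u n r i 1 ((c+1) * n) = pvSeq u n r i 1 n ++ pvSeq u n r i 1 (c * n) := by
  rw [show (c+1) * n = n + c * n by ring, pvSeq_append, pvSeq_shift]

theorem pvSeq_cycle_length (u : List Int) (n : Nat) (r : Int) (i : Nat) (c : Nat) :
    (pvSeq u n r i 1 (c * n)).length = c * (pvSeq u n r i 1 n).length := by
  induction c with
  | zero => simp [pvSeq]
  | succ c ih => rw [pvSeq_cycle, List.length_append, ih]; ring

theorem pvSeq_cycle_getD (u : List Int) (n : Nat) (r : Int) (i : Nat) :
    ∀ (c j : Nat), j < c * (pvSeq u n r i 1 n).length →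
    (pvSeq u n r i 1 (c * n)).getD j 0
      = (pvSeq u n r i 1 n).getD (j % (pvSeq u n r i 1 n).length) 0 := by
  intro c
  induction c with
  | zero => intro j hj; omega
  | succ c ih =>
    intro j hj
    rw [pvSeq_cycle]
    by_cases hij : j < (pvSeq u n r i 1 n).length
    · rw [List.getD_append _ _ _ _ hij, Nat.mod_eq_of_lt hij]
    · rw [not_lt] at hij
      rw [List.getD_append_right _ _ _ _ hij,
        ih (j - (pvSeq u n r i 1 n).length) (by rw [Nat.succ_mul] at hj; omega)]
      congr 1
      conv_rhs => rw [show j = (pvSeq u n r i 1 n).length + (j - (pvSeq u n r i 1 n).length) by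
        omega]
      rw [Nat.add_mod_left]

theorem pvSeq_take (u : List Int) (n : Nat) (r : Int) (i : Nat) (c m : Nat)
    (hm : m ≤ c * (pvSeq u n r i 1 n).length) :
    (pvSeq u n r i 1 (c * n)).take m
      = (List.range m).map (fun j => (pvSeq u n r i 1 n).getD (j % (pvSeq u n r i 1 n).length) 0) := by
  apply List.ext_getElem
  · simp [pvSeq_cycle_length]; omega
  · intro j h1 h2
    have hj : j < m := by simpa using h2
    have hjc : j < c * (pvSeq u n r i 1 n).length := by omega
    have hlen : j < (pvSeq u n r i 1 (c * n)).length := by rw [pvSeq_cycle_length]; omega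
    simp only [List.getElem_take, List.getElem_map, List.getElem_range]
    rw [← pvSeq_cycle_getD u n r i c j hjc, List.getD_eq_getElem _ _ hlen]

-- the last probe of a full cycle is the reviewer itself, so it contributes nothing
theorem pvSeq_full_cycle (u : List Int) (n : Nat) (r : Int) (i : Nat)
    (hi : i < n) (hr : u.getD i 0 = r) :
    pvSeq u n r i 1 n = pvSeq u n r i 1 (n - 1) := by
  have happ := pvSeq_append u n r i (n - 1) 1 1
  rw [show (n - 1) + 1 = n by omega] at happ
  have hz : pvSeq u n r i (1 + (n - 1)) 1 = [] := by
    rw [show 1 + (n - 1) = n by omega]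
    show (pvF u n r i n).toList ++ [] = []
    unfold pvF
    rw [show i + n = i + 1 * n by ring, Nat.add_mul_mod_self_right, Nat.mod_eq_of_lt hi, hr]
    simp
  rw [happ, hz, List.append_nil]

theorem pvSeq_mem (u : List Int) (n : Nat) (r : Int) (i : Nat) :
    ∀ (fuel step t : Nat), step ≤ t → t < step + fuel →
      ∀ v, pvF u n r i t = some v → v ∈ pvSeq u n r i step fuel := by
  intro fuel
  induction fuel with
  | zero => intro step t h1 h2; omega
  | succ f ih =>
    intro step t h1 h2 v hv
    rw [pvSeq, List.mem_append]
    by_cases hts : t = step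
    · left; rw [← hts, hv]; simp
    · right; exact ih (step + 1) t (by omega) (by omega) v hv

-- under Pre_, each reviewer has at least one valid peer
theorem pvSeq_ne_nil (u : List Int) (n : Nat) (r : Int) (i : Nat)
    (hi : i < n) (hn : n = u.length) (hr : u.getD i 0 = r)
    (hne : ¬ (∀ x ∈ u, x = u.getD 0 0)) :
    pvSeq u n r i 1 n ≠ [] := by
  rw [not_forall] at hne
  obtain ⟨x, hx⟩ := hne
  rw [Classical.not_imp] at hx
  obtain ⟨hxu, hx0⟩ := hx
  -- find an index j < n with u.getD j 0 ≠ r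
  have hj : ∃ j, j < n ∧ u.getD j 0 ≠ r := by
    by_cases h0 : u.getD 0 0 = r
    · obtain ⟨jx, hjx, hjval⟩ := List.getElem_of_mem hxu
      refine ⟨jx, by omega, ?_⟩
      rw [List.getD_eq_getElem _ _ (by omega), hjval]
      rw [← h0]; exact hx0
    · exact ⟨0, by omega, h0⟩
  obtain ⟨j, hjn, hjr⟩ := hj
  have hji : j ≠ i := fun h => hjr (h ▸ hr)
  -- the offset t with (i + t) % n = j, 1 ≤ t ≤ n - 1
  set t := if i < j then j - i else j + n - i with ht
  have h1t : 1 ≤ t := by rw [ht]; split <;> omega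
  have htn : t < 1 + n := by rw [ht]; split <;> omega
  have hmod : (i + t) % n = j := by
    rw [ht]
    split
    · rw [show i + (j - i) = j by omega]; exact Nat.mod_eq_of_lt hjn
    · rw [show i + (j + n - i) = j + 1 * n by omega, Nat.add_mul_mod_self_right]
      exact Nat.mod_eq_of_lt hjn
  have hf : pvF u n r i t = some (u.getD j 0) := by
    unfold pvF
    rw [hmod, if_pos hjr]
  exact List.ne_nil_of_mem (pvSeq_mem u n r i n 1 t h1t htn _ hf)

-- B's comprehension over range(1, n) is the first cycle of the pvSeq stream
theorem pvB_valids (u : List Int) (n : Nat) (r : Int) (i : Nat) :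
    ∀ (fuel step : Nat),
    (PySem.List.pyRange (step : Int) (((step + fuel : Nat) : Int)) 1).filterMap
        (fun t => if PySem.List.pyGetD u (PySem.Int.mod ((i : Int) + t) (n : Int)) 0 ≠ r
                  then some (PySem.List.pyGetD u (PySem.Int.mod ((i : Int) + t) (n : Int)) 0)
                  else none)
      = pvSeq u n r i step fuel := by
  intro fuel
  induction fuel with
  | zero =>
    intro step
    rw [show ((step + 0 : Nat) : Int) = (step : Int) by push_cast; ring,
      PySem.List.pyRange_one_eq_nil (le_refl _)]
    rfl
  | succ f ih =>
    intro step
    rw [PySem.List.pyRange_one_cons (by push_cast; omega)]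
    have hv : PySem.List.pyGetD u (PySem.Int.mod ((i : Int) + (step : Nat)) (n : Nat)) 0
        = u.getD ((i + step) % n) 0 := by
      rw [show ((i : Int) + (step : Nat)) = (((i + step : Nat) : Int)) by push_cast; ring,
        PySem.Int.mod_natCast, PySem.List.pyGetD_natCast]
    rw [pvSeq, List.filterMap_cons]
    simp only [hv]
    have hrec : ((step : Int) + 1) = (((step + 1 : Nat)) : Int) := by push_cast; ring
    have hend : ((step + (f + 1) : Nat) : Int) = (((step + 1) + f : Nat) : Int) := by
      push_cast; ring
    unfold pvF
    by_cases hc : u.getD ((i + step) % n) 0 ≠ r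
    · rw [if_pos hc, hrec, hend, ih (step + 1)]
      simp
    · rw [if_neg hc, hrec, hend, ih (step + 1)]
      simp

theorem pvFlatMap_congr {α β : Type} (l : List α) (f g : α → List β)
    (h : ∀ x ∈ l, f x = g x) : l.flatMap f = l.flatMap g := by
  induction l with
  | nil => rfl
  | cons a l ih =>
    simp only [List.flatMap_cons]
    rw [h a (by simp), ih (fun x hx => h x (by simp [hx]))]

-- ===== VERDICT (by name: the statement is the Claim_ definition above) =====
theorem round_robin_k_peers_py_spec : Claim_equal_round_robin_k_peers_py := by
  intro u k _ hpre
  unfold Spec_round_robin_k_peers_py round_robin_k_peers_py round_robin_k_peers_py_alt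
  dsimp only
  split_ifs with hcond
  · rfl
  · rw [not_or] at hcond
    obtain ⟨hn2, hk0⟩ := hcond
    have hpre' : ¬ (∀ x ∈ u, x = u.getD 0 0) := by
      rcases hpre with h1 | h2 | h3
      · omega
      · omega
      · exact h3
    simp only [PySem.List.foldl_append_singleton_eq_map, PySem.List.foldl_append_eq_flatMap,
      List.nil_append]
    refine pvFlatMap_congr _ _ _ (fun p hp => ?_)
    rw [PySem.List.mem_enumerate_iff] at hp
    obtain ⟨j, hj, rfl⟩ := hp
    dsimp only
    set n := u.length with hn
    set m := (min k ((n : Int) - 1)).toNat with hm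
    set r := u[j] with hrdef
    have hr : u.getD j 0 = r := List.getD_eq_getElem u 0 hj
    -- identify B's valids with the first pvSeq cycle
    have hB := pvB_valids u n r j (n - 1) 1
    rw [Nat.cast_one, show ((1 + (n - 1) : Nat) : Int) = (n : Int) by
      rw [show 1 + (n - 1) = n by omega]] at hB
    have hfull : pvSeq u n r j 1 n = pvSeq u n r j 1 (n - 1) :=
      pvSeq_full_cycle u n r j hj hr
    have hL : 0 < (pvSeq u n r j 1 n).length := by
      rw [List.length_pos_iff]
      exact pvSeq_ne_nil u n r j hj hn hr hpre'
    -- A's pick loop takes m elements of the stream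
    have hfuel : m ≤ ([] : List Int).length + (pvSeq u n r j 1 (m * n)).length := by
      rw [pvSeq_cycle_length]
      simpa using Nat.le_mul_of_pos_right m hL
    have hA := aPickLoop_eq u n r j m (m * n) [] 1 hfuel
    rw [Nat.mul_comm n m, show ((0 : Int) + (j : Int)) = ((j : Nat) : Int) by ring, hA,
      List.nil_append]
    simp only [List.length_nil, Nat.sub_zero]
    rw [pvSeq_take u n r j m m (by simpa using Nat.le_mul_of_pos_right m hL), List.map_map]
    rw [← hfull] at hB
    rw [hB]
    simp [Function.comp]
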